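-- pv_equiv track=rewrite | github.com/2024-2-analitica-descriptiva/2024-2-PRE-03-ingestion-de-texto-plano-scuartasr | homework/pregunta_01.py | combinar_strings
-- ===== SOURCE A (Python) =====
-- def encontrar_segmentos(texto: str) -> list:
--     """
--     Esta función recibe un string e identifica los diferentes segmentos
--     de texto, entendiendo como segmento de texto aquel que se encuentra
--     rodeado por dos o más espacios en blanco o un tabulador (no separa
--     si internamente se tiene solo un espacio entre palabra y palabra).
--     Retorna una lista con las posiciones del primer caracter de cada
--     segmento de texto
--     """
--     # Lista que almacenará las posiciones de texto
--     posiciones = []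
--
--     # Banderas dentro de la iteración
--     en_segmento = False
--     inicio_segmento = None
--     espacios_consecutivos = 0
--
--     # Iterando en la cadena de texto, conservando el índice y el elemento
--     for indice, elemento in enumerate(texto):
--         if elemento in (' ', '\t'):  # Contamos los espacios/tabulaciones consecutivos
--             espacios_consecutivos += 1
--         else:
--             # Si hay más de un espacio consecutivo y no nos encontramos en un
--             # segmento de texto...
--             if espacios_consecutivos > 1 and en_segmento:
--                 # ... guardamos la posición, porque es la primera de un segmento
--                 posiciones.append(inicio_segmento)
--                 en_segmento = False
--
--             espacios_consecutivos = 0  # Reiniciamos el contador de espacios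
--
--             if not en_segmento:  # Iniciamos un nuevo segmento
--                 inicio_segmento = indice
--                 en_segmento = True
--
--     if en_segmento:  # Si hay un segmento abierto al final del texto
--         posiciones.append(inicio_segmento)
--
--     return posiciones
--
-- def combinar_strings(string1: str, string2: str) -> list:
--     """
--     Toma los elementos de dos listas distintas y devuelve una única lista
--     con un resultado coherente
--     """
--
--     posiciones1 = encontrar_segmentos(string1)
--     posiciones2 = encontrar_segmentos(string2)
--     resultado = []
--
--     # Iterar sobre las posiciones de la primera lista
--     for i, pos1 in enumerate(posiciones1):
--         # Obtener el fragmento de string1 correspondiente a la posición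
--         if i + 1 < len(posiciones1):
--             fragmento1 = string1[pos1:posiciones1[i + 1]].strip()
--         else:
--             fragmento1 = string1[pos1:].strip()
--
--         # Verificar si la posición de string1 también está en posiciones2
--         if pos1 in posiciones2:
--             # Encontrar la posición en string2 correspondiente
--             j = posiciones2.index(pos1)
--             if j + 1 < len(posiciones2):
--                 fragmento2 = string2[posiciones2[j]:posiciones2[j + 1]].strip()
--             else:
--                 fragmento2 = string2[posiciones2[j]:].strip()
--
--             # Concatenar fragmento1 con fragmento2
--             fragmento1 = f"{fragmento1} {fragmento2}"
--
--         # Agregar el fragmento resultante alb resultado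
--         resultado.append(fragmento1)
--
--     return resultado
-- ===== SOURCE B (Python) =====
-- def combinar_strings(string1: str, string2: str) -> list:
--     """
--     Toma los elementos de dos listas distintas y devuelve una única lista
--     con un resultado coherente
--     """
--     def blank(c):
--         return c == ' ' or c == '\t'
--
--     def starts(s):
--         # Stateless characterization: position i starts a segment iff s[i] is
--         # non-blank and the (at most two) characters just before it are blank.
--         return [i for i, c in enumerate(s)
--                 if not blank(c)
--                 and (i == 0 or (blank(s[i - 1]) and (i == 1 or blank(s[i - 2]))))]
--
--     def fragments(s, ps):
--         # Pair each start with the next start (or the end of the string) and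
--         # cut the fragment once, up front.
--         return [(p, s[p:q].strip()) for p, q in zip(ps, ps[1:] + [len(s)])]
--
--     f1 = fragments(string1, starts(string1))
--     f2 = fragments(string2, starts(string2))
--
--     # Sorted merge join: both position lists are strictly increasing, so one
--     # pointer j sweeps f2 exactly once across the whole loop.
--     out = []
--     j = 0
--     for p, frag in f1:
--         while j < len(f2) and f2[j][0] < p:
--             j += 1
--         if j < len(f2) and f2[j][0] == p:
--             out.append(frag + " " + f2[j][1])
--         else:
--             out.append(frag)
--     return out
-- ===== Notes on version B (the rewrite author's own statement) =====
-- stated objective: alternative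
-- what changed: B replaces A's stateful flag/counter scan by a stateless two-character-lookback filter for segment starts, precomputes (start, fragment) pairs by zipping each start with the next, and merges the two strings with a two-pointer sorted merge join instead of A's per-element membership test and .index scan.
import Mathlib
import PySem

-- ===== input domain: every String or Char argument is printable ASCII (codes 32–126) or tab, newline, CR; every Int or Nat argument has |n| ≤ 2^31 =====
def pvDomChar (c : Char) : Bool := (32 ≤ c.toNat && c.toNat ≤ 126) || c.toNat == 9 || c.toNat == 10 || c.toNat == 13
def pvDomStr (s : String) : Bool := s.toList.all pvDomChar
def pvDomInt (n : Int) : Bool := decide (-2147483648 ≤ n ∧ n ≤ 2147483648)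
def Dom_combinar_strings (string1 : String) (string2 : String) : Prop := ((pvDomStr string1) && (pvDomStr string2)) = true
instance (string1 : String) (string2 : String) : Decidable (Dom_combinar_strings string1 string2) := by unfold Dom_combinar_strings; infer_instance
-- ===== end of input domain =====

-- B finds segment starts with a stateless two-character-lookback filter, pairs each start
-- with the next by zipping, and joins the two strings with a two-pointer sorted merge
-- instead of A's membership test + .index scan; return value proved equal.

-- ===== PORT A =====
-- loop body of A's encontrar_segmentos; state = (posiciones, en_segmento, inicio_segmento, espacios_consecutivos)
def fA (st : List Int × Bool × Option Int × Int) (p : Int × Char) : List Int × Bool × Option Int × Int :=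
  match st with
  | (posiciones, enSeg, inicio, esp) =>
    if p.2 = ' ' ∨ p.2 = '\t' then (posiciones, enSeg, inicio, esp + 1)
    else
      let posiciones' := if esp > 1 ∧ enSeg = true then posiciones ++ [inicio.getD 0] else posiciones
      let enSeg' := if esp > 1 ∧ enSeg = true then false else enSeg
      -- espacios_consecutivos := 0; then: if not en_segmento, open a new segment
      if enSeg' = false then (posiciones', true, some p.1, 0) else (posiciones', enSeg', inicio, 0)

-- trailing "if en_segmento: posiciones.append(inicio_segmento)" (inicio is never none when appended)
def finA (st : List Int × Bool × Option Int × Int) : List Int :=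
  match st with
  | (posiciones, enSeg, inicio, _) => if enSeg then posiciones ++ [inicio.getD 0] else posiciones

def encontrar_segmentos (texto : String) : List Int :=
  finA ((PySem.List.enumerate texto.toList 0).foldl fA ([], false, none, 0))

def combinar_strings (string1 : String) (string2 : String) : List String :=
  let posiciones1 := encontrar_segmentos string1
  let posiciones2 := encontrar_segmentos string2
  (PySem.List.enumerate posiciones1 0).foldl (fun resultado ip =>
    let fragmento1 :=
      if ip.1 + 1 < (posiciones1.length : Int) then
        PySem.Str.strip (PySem.Str.slice string1 (some ip.2) (some (PySem.List.pyGetD posiciones1 (ip.1 + 1) 0)))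
      else
        PySem.Str.strip (PySem.Str.slice string1 (some ip.2) none)
    let fragmento1 :=
      if ip.2 ∈ posiciones2 then
        -- j = posiciones2.index(ip.2); .index cannot raise here (membership just checked), so getD's default is never used
        let j := (PySem.List.index? posiciones2 ip.2).getD 0
        let fragmento2 :=
          if (j : Int) + 1 < (posiciones2.length : Int) then
            PySem.Str.strip (PySem.Str.slice string2 (some (PySem.List.pyGetD posiciones2 (j : Int) 0))
              (some (PySem.List.pyGetD posiciones2 ((j : Int) + 1) 0)))
          else
            PySem.Str.strip (PySem.Str.slice string2 (some (PySem.List.pyGetD posiciones2 (j : Int) 0)) none)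
        fragmento1 ++ " " ++ fragmento2
      else fragmento1
    resultado ++ [fragmento1]) []

-- ===== PORT B =====
def blankb (c : Char) : Bool := c == ' ' || c == '\t'

-- the comprehension's condition in B's starts; the pyGet? lookbacks are only reached when
-- the index is in range (Python's `or`/`and` short-circuit), so the `.getD ' '` default is never used
def condB (cs : List Char) (p : Int × Char) : Bool :=
  !blankb p.2 && (p.1 == 0 || (blankb ((PySem.List.pyGet? cs (p.1 - 1)).getD ' ') &&
    (p.1 == 1 || blankb ((PySem.List.pyGet? cs (p.1 - 2)).getD ' '))))

def startsB (s : String) : List Int :=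
  ((PySem.List.enumerate s.toList 0).filter (condB s.toList)).map Prod.fst

-- fragments(s, ps): zip each start with the next start (or len(s)) and cut once
def fragsB (s : String) (ps : List Int) : List (Int × String) :=
  (ps.zip (ps.drop 1 ++ [PySem.Str.len s])).map
    (fun pq => (pq.1, PySem.Str.strip (PySem.Str.slice s (some pq.1) (some pq.2))))


-- the `while j < len(f2) and f2[j][0] < p: j += 1` loop
def advanceB (f2 : List (Int × String)) (pos : Int) (j : Nat) : Nat :=
  if h : j < f2.length then
    if (f2[j]).1 < pos then advanceB f2 pos (j + 1) else j
  else j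
termination_by f2.length - j

-- the `for p, frag in f1` loop; state = (out, j)
def mergeB (f1 f2 : List (Int × String)) : List String :=
  (f1.foldl (fun st pf =>
    let j := advanceB f2 pf.1 st.2
    match f2[j]? with
    | some qg => if qg.1 == pf.1 then (st.1 ++ [pf.2 ++ " " ++ qg.2], j) else (st.1 ++ [pf.2], j)
    | none => (st.1 ++ [pf.2], j)) ([], 0)).1

def combinar_strings_alt (string1 : String) (string2 : String) : List String :=
  mergeB (fragsB string1 (startsB string1)) (fragsB string2 (startsB string2))

-- ===== PRECONDITION & SPEC =====
def Spec_combinar_strings (string1 : String) (string2 : String) (out : List String) : Prop := out = combinar_strings_alt string1 string2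
instance (string1 : String) (string2 : String) (out : List String) : Decidable (Spec_combinar_strings string1 string2 out) := by unfold Spec_combinar_strings; infer_instance

-- ===== CLAIM =====
def Claim_equal_combinar_strings : Prop := ∀ (string1 : String) (string2 : String), Dom_combinar_strings string1 string2 → Spec_combinar_strings string1 string2 (combinar_strings string1 string2)

-- ===== LEMMAS AND PROOFS =====

-- eager single-state scan, the common middle point between A's deferred scan and B's filter;
-- state = (res, gap, seen)
def fB (st : List Int × Int × Bool) (p : Int × Char) : List Int × Int × Bool :=
  match st with
  | (res, gap, seen) =>
    if p.2 = ' ' ∨ p.2 = '\t' then (res, gap + 1, seen)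
    else ((if seen = false ∨ gap > 1 then res ++ [p.1] else res), 0, true)

def eagerStarts (t : String) : List Int :=
  ((PySem.List.enumerate t.toList 0).foldl fB ([], 0, false)).1

-- A's deferred append (position saved when the segment closes / at the end)
-- equals the eager append, for an open segment …
lemma relA (l : List (Int × Char)) : ∀ (acc : List Int) (v esp : Int),
    finA (l.foldl fA (acc, true, some v, esp)) = (l.foldl fB (acc ++ [v], esp, true)).1 := by
  induction l with
  | nil => intro acc v esp; simp [finA]
  | cons p l ih =>
    intro acc v esp
    by_cases hsp : p.2 = ' ' ∨ p.2 = '\t'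
    · simp only [List.foldl_cons, fA, fB, if_pos hsp]
      exact ih acc v (esp + 1)
    · by_cases hgap : esp > 1
      · simp only [List.foldl_cons, fA, fB]
        simp [hsp, hgap]
        simpa [List.append_assoc] using ih (acc ++ [v]) p.1 0
      · simp only [List.foldl_cons, fA, fB]
        simp [hsp, hgap]
        simpa using ih acc v 0

-- … and for the not-yet-opened state.
lemma relB (l : List (Int × Char)) : ∀ (esp : Int),
    finA (l.foldl fA ([], false, none, esp)) = (l.foldl fB ([], esp, false)).1 := by
  induction l with
  | nil => intro esp; simp [finA]
  | cons p l ih =>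
    intro esp
    by_cases hsp : p.2 = ' ' ∨ p.2 = '\t'
    · simp only [List.foldl_cons, fA, fB, if_pos hsp]
      exact ih (esp + 1)
    · simp only [List.foldl_cons, fA, fB]
      simp [hsp]
      simpa using relA l [] p.1 0

-- the segmentation scans agree: A = eager
lemma seg_eq_eager (t : String) : encontrar_segmentos t = eagerStarts t := by
  unfold encontrar_segmentos eagerStarts
  exact relB _ 0

lemma cond_equiv (pre suf' : List Char) (c : Char) (hc : blankb c = false) :
    condB (pre ++ c :: suf') ((pre.length : Int), c) = true ↔
    (pre.any (fun x => !blankb x) = false ∨ ((pre.reverse.takeWhile blankb).length : Int) > 1) := by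
  rcases List.eq_nil_or_concat pre with rfl | ⟨pre', d, hpre⟩
  · simp [condB, hc]
  rw [List.concat_eq_append] at hpre; subst hpre
  have hg1 : PySem.List.pyGet? (pre' ++ [d] ++ c :: suf') (((pre' ++ [d]).length : Int) - 1)
      = some d := by
    have h2 : (pre' ++ [d] ++ c :: suf') = pre' ++ d :: c :: suf' := by simp
    have hn : ((pre' ++ [d]).length : Int) - 1 = (pre'.length : Int) := by simp
    rw [h2, hn]; exact PySem.List.pyGet?_append_length _ _ _
  have hne0 : ((((pre' ++ [d]).length : Int)) == 0) = false := by
    simp only [beq_eq_false_iff_ne, ne_eq, List.length_append, List.length_cons,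
      List.length_nil]
    push_cast; omega
  by_cases hd : blankb d = true
  · rcases List.eq_nil_or_concat pre' with rfl | ⟨pre'', e, hpre'⟩
    · simp only [condB, hc, Bool.not_false, Bool.true_and, hne0, Bool.false_or, hg1,
        Option.getD_some, hd, Bool.true_and, List.nil_append]
      have h1 : ((([d] : List Char).length : Int) == 1) = true := by simp
      simp [h1, List.any_cons, hd, List.all_nil]
    rw [List.concat_eq_append] at hpre'; subst hpre'
    have hne1 : ((((pre'' ++ [e] ++ [d]).length : Int)) == 1) = false := by
      simp only [beq_eq_false_iff_ne, ne_eq, List.length_append, List.length_cons,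
        List.length_nil]
      push_cast; omega
    have hg2 : PySem.List.pyGet? (pre'' ++ [e] ++ [d] ++ c :: suf') (((pre'' ++ [e] ++ [d]).length : Int) - 2)
        = some e := by
      have h2 : (pre'' ++ [e] ++ [d] ++ c :: suf') = pre'' ++ e :: d :: c :: suf' := by simp
      have hn : ((pre'' ++ [e] ++ [d]).length : Int) - 2 = (pre''.length : Int) := by
        simp
      rw [h2, hn]; exact PySem.List.pyGet?_append_length _ _ _
    simp only [condB, hc, Bool.not_false, Bool.true_and, hne0, Bool.false_or, hg1, hg2,
      Option.getD_some, hd, Bool.true_and, hne1, Bool.false_or]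
    have hrev : (pre'' ++ [e] ++ [d]).reverse = d :: e :: pre''.reverse := by simp
    rw [hrev, List.takeWhile_cons_of_pos hd]
    by_cases he : blankb e = true
    · rw [List.takeWhile_cons_of_pos he]
      simp [he]
    · rw [List.takeWhile_cons_of_neg (by simp [he])]
      simp [he, List.any_append]
  · have hd' : blankb d = false := Bool.not_eq_true _ ▸ hd
    have hrev : (pre' ++ [d]).reverse = d :: pre'.reverse := by simp
    simp only [condB, hc, Bool.not_false, Bool.true_and, hne0, Bool.false_or, hg1,
      Option.getD_some, hrev]
    rw [List.takeWhile_cons_of_neg (by simp [hd'])]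
    simp [hd', List.any_append]

lemma blankb_iff (c : Char) : blankb c = true ↔ (c = ' ' ∨ c = '\t') := by
  simp [blankb]

lemma eager_filter_aux (cs : List Char) : ∀ (suf pre : List Char) (acc : List Int),
    cs = pre ++ suf →
    ((PySem.List.enumerate suf (pre.length : Int)).foldl fB
       (acc, ((pre.reverse.takeWhile blankb).length : Int), pre.any (fun x => !blankb x))).1
    = acc ++ ((PySem.List.enumerate suf (pre.length : Int)).filter (condB cs)).map Prod.fst := by
  intro suf
  induction suf with
  | nil => intro pre acc h; simp [PySem.List.enumerate]
  | cons c suf' ih =>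
    intro pre acc h
    rw [PySem.List.enumerate_cons]
    by_cases hb : blankb c = true
    · have hsp : ((c = ' ' ∨ c = '\t')) := (blankb_iff c).mp hb
      simp only [List.foldl_cons, fB, if_pos hsp, List.filter_cons]
      have hcond : condB cs ((pre.length : Int), c) = false := by
        simp [condB, hb]
      rw [hcond]
      have h1 : ((pre ++ [c]).length : Int) = (pre.length : Int) + 1 := by push_cast; simp
      have h2 : (((pre ++ [c]).reverse.takeWhile blankb).length : Int)
          = ((pre.reverse.takeWhile blankb).length : Int) + 1 := by
        rw [List.reverse_append]
        simp [List.takeWhile_cons_of_pos hb]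
      have h3 : (pre ++ [c]).any (fun x => !blankb x) = pre.any (fun x => !blankb x) := by
        simp [List.any_append, hb]
      have := ih (pre ++ [c]) acc (by simp [h])
      rw [h1, h2, h3] at this
      simp only [Bool.false_eq_true, if_neg] at *
      exact this
    · have hb' : blankb c = false := by simpa using hb
      have hsp : ¬ ((c = ' ' ∨ c = '\t')) := by
        rw [← blankb_iff, hb']; simp
      simp only [List.foldl_cons, fB, if_neg hsp, List.filter_cons]
      have h1 : ((pre ++ [c]).length : Int) = (pre.length : Int) + 1 := by push_cast; simp
      have h2 : (((pre ++ [c]).reverse.takeWhile blankb).length : Int) = 0 := by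
        rw [List.reverse_append]
        simp [List.takeWhile_cons_of_neg, hb']
      have h3 : (pre ++ [c]).any (fun x => !blankb x) = true := by
        simp [List.any_append, hb']
      have hcs : cs = pre ++ c :: suf' := h
      have hcond := cond_equiv pre suf' c hb'
      rw [← hcs] at hcond
      have := ih (pre ++ [c]) (if pre.any (fun x => !blankb x) = false ∨ ((pre.reverse.takeWhile blankb).length : Int) > 1 then acc ++ [(pre.length : Int)] else acc) (by simp [h])
      rw [h1, h2, h3] at this
      rw [this]
      by_cases hcnd : (pre.any (fun x => !blankb x) = false ∨ ((pre.reverse.takeWhile blankb).length : Int) > 1)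
      · rw [if_pos hcnd, if_pos (hcond.mpr hcnd)]
        simp
      · rw [if_neg hcnd, if_neg (fun hh => hcnd (hcond.mp hh))]

lemma eager_eq_filter' (t : String) :
    ((PySem.List.enumerate t.toList 0).foldl fB ([], 0, false)).1
    = ((PySem.List.enumerate t.toList 0).filter (condB t.toList)).map Prod.fst := by
  have := eager_filter_aux t.toList t.toList [] [] (by simp)
  simpa using this

lemma advance_spec (f2 : List (Int × String)) (pos : Int) : ∀ (j : Nat),
    j ≤ f2.length →
    (∀ k (hk : k < f2.length), k < j → (f2[k]).1 < pos) →
    (j ≤ advanceB f2 pos j ∧ advanceB f2 pos j ≤ f2.length ∧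
     (∀ k (hk : k < f2.length), k < advanceB f2 pos j → (f2[k]).1 < pos) ∧
     (∀ h : advanceB f2 pos j < f2.length, ¬ (f2[advanceB f2 pos j]).1 < pos)) := by
  intro j
  induction j using (advanceB.induct f2 pos) with
  | case1 j h hlt ih =>
    intro hjle hinv
    rw [advanceB, dif_pos h, if_pos hlt]
    have hinv' : ∀ k (hk : k < f2.length), k < j + 1 → (f2[k]).1 < pos := by
      intro k hk hkj
      rcases Nat.lt_succ_iff_lt_or_eq.mp hkj with h' | rfl
      · exact hinv k hk h'
      · exact hlt
    obtain ⟨a, b, c, d⟩ := ih (by omega) hinv'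
    exact ⟨by omega, b, c, d⟩
  | case2 j h hlt =>
    intro hjle hinv
    rw [advanceB, dif_pos h, if_neg hlt]
    exact ⟨le_refl _, by omega, hinv, fun _ => hlt⟩
  | case3 j h =>
    intro hjle hinv
    rw [advanceB, dif_neg h]
    exact ⟨le_refl _, by omega, hinv, fun hh => absurd hh h⟩

lemma find?_eq_some_of_first (f2 : List (Int × String)) (pos : Int) (j : Nat)
    (hj : j < f2.length) (hq : (f2[j]).1 = pos)
    (hbef : ∀ k (hk : k < f2.length), k < j → (f2[k]).1 < pos) :
    f2.find? (fun qg => qg.1 == pos) = some f2[j] := by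
  rw [List.find?_eq_some_iff_getElem]
  refine ⟨by simp [hq], j, hj, rfl, ?_⟩
  intro k hk
  have := hbef k (by omega) hk
  simp only [Bool.not_eq_true', beq_eq_false_iff_ne, ne_eq]
  omega

lemma find?_eq_none_of_all (f2 : List (Int × String)) (pos : Int)
    (h : ∀ qg ∈ f2, (qg.1 ≠ pos)) :
    f2.find? (fun qg => qg.1 == pos) = none := by
  rw [List.find?_eq_none]
  intro qg hqg
  simp [h qg hqg]

def mergeStep (f2 : List (Int × String)) (st : List String × Nat) (pf : Int × String) : List String × Nat :=
  match f2[advanceB f2 pf.1 st.2]? with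
  | some qg => if qg.1 == pf.1 then (st.1 ++ [pf.2 ++ " " ++ qg.2], advanceB f2 pf.1 st.2)
               else (st.1 ++ [pf.2], advanceB f2 pf.1 st.2)
  | none => (st.1 ++ [pf.2], advanceB f2 pf.1 st.2)

lemma merge_go (f2 : List (Int × String)) (hs : f2.Pairwise (fun a b => a.1 < b.1)) :
    ∀ (f1 : List (Int × String)) (out : List String) (j : Nat),
    j ≤ f2.length →
    f1.Pairwise (fun a b => a.1 < b.1) →
    (∀ k (hk : k < f2.length), k < j → ∀ pf ∈ f1, (f2[k]).1 < pf.1) →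
    (f1.foldl (mergeStep f2) (out, j)).1
    = out ++ f1.map (fun pf =>
        match f2.find? (fun qg => qg.1 == pf.1) with
        | some qg => pf.2 ++ " " ++ qg.2
        | none => pf.2) := by
  intro f1
  induction f1 with
  | nil => intro out j _ _ _; simp
  | cons pf rest ih =>
    intro out j hjle hp hinv
    have hinv0 : ∀ k (hk : k < f2.length), k < j → (f2[k]).1 < pf.1 := by
      intro k hk hkj; exact hinv k hk hkj pf (by simp)
    obtain ⟨hle, hlen, hall, hstop⟩ := advance_spec f2 pf.1 j hjle hinv0
    set j' := advanceB f2 pf.1 j with hj'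
    have hrest : ∀ pf' ∈ rest, pf.1 < pf'.1 := (List.pairwise_cons.mp hp).1
    have hinv' : ∀ k (hk : k < f2.length), k < j' → ∀ pf' ∈ rest, (f2[k]).1 < pf'.1 := by
      intro k hk hkj pf' hpf'
      exact lt_trans (hall k hk hkj) (hrest pf' hpf')
    have hptail : rest.Pairwise (fun a b => a.1 < b.1) := (List.pairwise_cons.mp hp).2
    simp only [List.foldl_cons, List.map_cons, mergeStep]
    rw [← hj']
    by_cases hcase : j' < f2.length
    · have hget : f2[j']? = some f2[j'] := List.getElem?_eq_getElem hcase
      by_cases heq : (f2[j']).1 = pf.1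
      · have hfind : f2.find? (fun qg => qg.1 == pf.1) = some f2[j'] :=
          find?_eq_some_of_first f2 pf.1 j' hcase heq hall
        simp only [hget, heq]
        rw [if_pos (beq_self_eq_true pf.1)]
        rw [ih (out ++ [pf.2 ++ " " ++ (f2[j']).2]) j' hlen hptail hinv']
        rw [hfind]
        simp
      · have hgt : pf.1 < (f2[j']).1 := by
          have := hstop hcase
          omega
        have hfind : f2.find? (fun qg => qg.1 == pf.1) = none := by
          apply find?_eq_none_of_all
          intro qg hqg
          obtain ⟨k, hk, rfl⟩ := List.getElem_of_mem hqg
          rcases lt_trichotomy k j' with h' | rfl | h'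
          · have := hall k hk h'; omega
          · omega
          · have : (f2[j']).1 < (f2[k]).1 :=
              (List.pairwise_iff_getElem.mp hs) j' k hcase hk h'
            omega
        simp only [hget]
        rw [if_neg (by simpa using heq)]
        rw [ih (out ++ [pf.2]) j' hlen hptail hinv']
        rw [hfind]
        simp
    · have hget : f2[j']? = none := by
        rw [List.getElem?_eq_none_iff]; omega
      have hfind : f2.find? (fun qg => qg.1 == pf.1) = none := by
        apply find?_eq_none_of_all
        intro qg hqg
        obtain ⟨k, hk, rfl⟩ := List.getElem_of_mem hqg
        have := hall k hk (by omega)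
        omega
      simp only [hget]
      rw [ih (out ++ [pf.2]) j' hlen hptail hinv']
      rw [hfind]
      simp

-- eager scan = B's stateless filter
lemma eager_eq_filter (t : String) : eagerStarts t = startsB t := by
  unfold eagerStarts startsB
  exact eager_eq_filter' t

lemma seg_eq (t : String) : encontrar_segmentos t = startsB t := by
  rw [seg_eq_eager, eager_eq_filter]

-- invariant of the eager scan: result is strictly increasing and bounded by the scanned range
lemma fB_inv (xs : List Char) : ∀ (s : Int) (acc : List Int) (gap : Int) (seen : Bool),
    acc.Pairwise (· < ·) → (∀ x ∈ acc, x < s) →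
    (((PySem.List.enumerate xs s).foldl fB (acc, gap, seen)).1.Pairwise (· < ·) ∧
      ∀ x ∈ ((PySem.List.enumerate xs s).foldl fB (acc, gap, seen)).1, x < s + xs.length ∧ (s ≤ x ∨ x ∈ acc)) := by
  induction xs with
  | nil => intro s acc gap seen h1 h2; refine ⟨by simpa [PySem.List.enumerate] using h1, ?_⟩
           intro x hx; simp [PySem.List.enumerate] at hx
           exact ⟨by simpa using lt_of_lt_of_le (h2 x hx) (by simp), Or.inr hx⟩
  | cons c xs ih =>
    intro s acc gap seen h1 h2
    rw [PySem.List.enumerate_cons]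
    by_cases hsp : c = ' ' ∨ c = '\t'
    · simp only [List.foldl_cons, fB, if_pos hsp]
      obtain ⟨hp, hb⟩ := ih (s + 1) acc (gap + 1) seen h1 (fun x hx => lt_of_lt_of_le (h2 x hx) (by omega))
      refine ⟨hp, fun x hx => ?_⟩
      obtain ⟨hlt, hmem⟩ := hb x hx
      constructor
      · simp only [List.length_cons] at *; push_cast at hlt ⊢; omega
      · rcases hmem with h | h
        · left; omega
        · rcases (lt_or_ge x s) with hx' | hx'
          · right; exact h
          · left; exact hx'
    · simp only [List.foldl_cons, fB, if_neg hsp]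
      by_cases happ : seen = false ∨ gap > 1
      · simp only [if_pos happ]
        have h1' : (acc ++ [s]).Pairwise (· < ·) := by
          simp [List.pairwise_append, h1]
          intro a ha; exact h2 a ha
        have h2' : ∀ x ∈ acc ++ [s], x < s + 1 := by
          intro x hx; rcases List.mem_append.mp hx with h | h
          · exact lt_of_lt_of_le (h2 x h) (by omega)
          · simp at h; omega
        obtain ⟨hp, hb⟩ := ih (s + 1) (acc ++ [s]) 0 true h1' h2'
        refine ⟨hp, fun x hx => ?_⟩
        obtain ⟨hlt, hmem⟩ := hb x hx
        constructor
        · simp only [List.length_cons] at *; push_cast at hlt ⊢; omega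
        · rcases hmem with h | h
          · left; omega
          · rcases List.mem_append.mp h with h' | h'
            · rcases (lt_or_ge x s) with hx' | hx'
              · right; exact h'
              · left; exact hx'
            · simp at h'; left; omega
      · simp only [if_neg happ]
        obtain ⟨hp, hb⟩ := ih (s + 1) acc 0 true h1 (fun x hx => lt_of_lt_of_le (h2 x hx) (by omega))
        refine ⟨hp, fun x hx => ?_⟩
        obtain ⟨hlt, hmem⟩ := hb x hx
        constructor
        · simp only [List.length_cons] at *; push_cast at hlt ⊢; omega
        · rcases hmem with h | h
          · left; omega
          · rcases (lt_or_ge x s) with hx' | hx'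
            · right; exact h
            · left; exact hx'

lemma startsB_pairwise (t : String) : (startsB t).Pairwise (· < ·) := by
  rw [← eager_eq_filter]
  exact (fB_inv t.toList 0 [] 0 false (by simp) (by simp)).1

lemma startsB_nonneg (t : String) : ∀ x ∈ startsB t, 0 ≤ x := by
  rw [← eager_eq_filter]
  intro x hx
  have := ((fB_inv t.toList 0 [] 0 false (by simp) (by simp)).2 x hx).2
  rcases this with h | h
  · exact h
  · simp at h

-- s[a:] = s[a:len(s)] for 0 ≤ a (Python slices clamp)
lemma slice_none_eq_len (s : String) (a : Int) (ha : 0 ≤ a) :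
    PySem.Str.slice s (some a) none = PySem.Str.slice s (some a) (some (PySem.Str.len s)) := by
  show String.ofList _ = String.ofList _
  congr 1
  simp only [PySem.Chars.slice_eq_listSlice]
  rw [PySem.List.slice_from _ ha, PySem.Str.len_eq,
    PySem.List.slice_toNat _ ha (by positivity)]
  rw [List.take_of_length_le]
  simp


-- fragsB basics --------------------------------------------------------------

lemma drop_append_len (ps : List Int) (L : Int) : (ps.drop 1 ++ [L]).length = max ps.length 1 := by
  simp; omega

lemma fragsB_length (s : String) (ps : List Int) : (fragsB s ps).length = ps.length := by
  unfold fragsB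
  rw [List.length_map, List.length_zip, drop_append_len]
  omega

lemma drop_append_getElem (ps : List Int) (L : Int) (i : Nat) (hi : i < ps.length) :
    (ps.drop 1 ++ [L])[i]'(by rw [drop_append_len]; omega)
      = if h : i + 1 < ps.length then ps[i + 1] else L := by
  by_cases h : i + 1 < ps.length
  · rw [dif_pos h, List.getElem_append_left (by simp; omega)]
    rw [List.getElem_drop]
    congr 1
    omega
  · rw [dif_neg h]
    have hlen : (ps.drop 1).length = ps.length - 1 := by simp
    rw [List.getElem_append_right (by omega)]
    simp

lemma fragsB_getElem (s : String) (ps : List Int) (i : Nat) (hi : i < ps.length) :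
    (fragsB s ps)[i]'(by rw [fragsB_length]; exact hi)
      = (ps[i], PySem.Str.strip (PySem.Str.slice s (some ps[i])
          (some (if h : i + 1 < ps.length then ps[i + 1] else PySem.Str.len s)))) := by
  unfold fragsB
  rw [List.getElem_map, List.getElem_zip]
  rw [drop_append_getElem ps (PySem.Str.len s) i hi]

lemma fragsB_map_fst (s : String) (ps : List Int) : (fragsB s ps).map Prod.fst = ps := by
  apply List.ext_getElem
  · rw [List.length_map, fragsB_length]
  · intro i h1 h2
    rw [List.getElem_map]
    rw [fragsB_getElem s ps i h2]

lemma fragsB_pairwise (s : String) (ps : List Int) (h : ps.Pairwise (· < ·)) :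
    (fragsB s ps).Pairwise (fun a b => a.1 < b.1) := by
  rw [← fragsB_map_fst s ps] at h
  exact List.pairwise_map.mp h

-- find? ↔ index? on the fragment list ----------------------------------------

lemma find?_of_index? (f2 : List (Int × String)) (pos : Int) (j0 : Nat)
    (hidx : PySem.List.index? (f2.map Prod.fst) pos = some j0) :
    ∃ hj : j0 < f2.length, f2.find? (fun qg => qg.1 == pos) = some (f2[j0]'hj) := by
  obtain ⟨hjlt, hjeq, hbef⟩ := PySem.List.getElem_of_index?_eq_some hidx
  rw [List.length_map] at hjlt
  refine ⟨hjlt, ?_⟩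
  rw [List.find?_eq_some_iff_getElem]
  refine ⟨?_, j0, hjlt, rfl, ?_⟩
  · rw [List.getElem_map] at hjeq
    simp [hjeq]
  · intro k hk
    have := hbef k (by omega)
    rw [List.getElem_map] at this
    simp only [Bool.not_eq_true', beq_eq_false_iff_ne, ne_eq]
    exact this

lemma find?_none_of_not_mem (f2 : List (Int × String)) (pos : Int)
    (h : pos ∉ f2.map Prod.fst) : f2.find? (fun qg => qg.1 == pos) = none := by
  apply find?_eq_none_of_all
  intro qg hqg hq
  exact h (List.mem_map.mpr ⟨qg, hqg, hq⟩)

-- A's loop body as a function (zeta-expansion of the port's lets) -------------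

def gA (string1 string2 : String) (posiciones1 posiciones2 : List Int) (ip : Int × Int) : String :=
  let fragmento1 :=
    if ip.1 + 1 < (posiciones1.length : Int) then
      PySem.Str.strip (PySem.Str.slice string1 (some ip.2) (some (PySem.List.pyGetD posiciones1 (ip.1 + 1) 0)))
    else
      PySem.Str.strip (PySem.Str.slice string1 (some ip.2) none)
  if ip.2 ∈ posiciones2 then
    let j := (PySem.List.index? posiciones2 ip.2).getD 0
    let fragmento2 :=
      if (j : Int) + 1 < (posiciones2.length : Int) then
        PySem.Str.strip (PySem.Str.slice string2 (some (PySem.List.pyGetD posiciones2 (j : Int) 0))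
          (some (PySem.List.pyGetD posiciones2 ((j : Int) + 1) 0)))
      else
        PySem.Str.strip (PySem.Str.slice string2 (some (PySem.List.pyGetD posiciones2 (j : Int) 0)) none)
    fragmento1 ++ " " ++ fragmento2
  else fragmento1

lemma A_map (s1 s2 : String) : combinar_strings s1 s2
    = (PySem.List.enumerate (startsB s1) 0).map (gA s1 s2 (startsB s1) (startsB s2)) := by
  have h : combinar_strings s1 s2
      = (PySem.List.enumerate (encontrar_segmentos s1) 0).foldl
          (fun res ip => res ++ [gA s1 s2 (encontrar_segmentos s1) (encontrar_segmentos s2) ip]) [] := rfl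
  rw [h, seg_eq s1, seg_eq s2, PySem.List.foldl_append_singleton_eq_map]
  simp

lemma B_map (s1 s2 : String) : combinar_strings_alt s1 s2
    = (fragsB s1 (startsB s1)).map (fun pf =>
        match (fragsB s2 (startsB s2)).find? (fun qg => qg.1 == pf.1) with
        | some qg => pf.2 ++ " " ++ qg.2
        | none => pf.2) := by
  have h : combinar_strings_alt s1 s2
      = ((fragsB s1 (startsB s1)).foldl (mergeStep (fragsB s2 (startsB s2))) ([], 0)).1 := rfl
  rw [h]
  rw [merge_go (fragsB s2 (startsB s2)) (fragsB_pairwise s2 _ (startsB_pairwise s2))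
    (fragsB s1 (startsB s1)) [] 0 (by omega)
    (fragsB_pairwise s1 _ (startsB_pairwise s1))
    (fun k hk h0 => absurd h0 (by omega))]
  simp

-- per-element agreement -------------------------------------------------------

lemma elem_eq (s1 s2 : String) (p1 p2 : List Int)
    (h1n : ∀ x ∈ p1, (0:Int) ≤ x) (h2n : ∀ x ∈ p2, (0:Int) ≤ x)
    (i : Nat) (hi : i < p1.length) :
    gA s1 s2 p1 p2 ((0:Int) + (i:Int), p1[i])
      = (fun pf : Int × String =>
          match (fragsB s2 p2).find? (fun qg => qg.1 == pf.1) with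
          | some qg => pf.2 ++ " " ++ qg.2
          | none => pf.2)
        (p1[i], PySem.Str.strip (PySem.Str.slice s1 (some p1[i])
          (some (if h : i + 1 < p1.length then p1[i + 1] else PySem.Str.len s1)))) := by
  have hpos1 : (0:Int) ≤ p1[i] := h1n _ (List.getElem_mem hi)
  have hf1 : (if (0:Int) + (i:Int) + 1 < (p1.length : Int) then
        PySem.Str.strip (PySem.Str.slice s1 (some p1[i]) (some (PySem.List.pyGetD p1 ((0:Int) + (i:Int) + 1) 0)))
      else PySem.Str.strip (PySem.Str.slice s1 (some p1[i]) none))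
      = PySem.Str.strip (PySem.Str.slice s1 (some p1[i])
          (some (if h : i + 1 < p1.length then p1[i + 1] else PySem.Str.len s1))) := by
    by_cases h : i + 1 < p1.length
    · rw [if_pos (by push_cast; omega), dif_pos h]
      have : (0:Int) + (i:Int) + 1 = ((i + 1 : Nat) : Int) := by push_cast; ring
      rw [this, PySem.List.pyGetD_natCast, List.getD_eq_getElem _ _ h]
    · rw [if_neg (by push_cast; omega), dif_neg h, slice_none_eq_len s1 _ hpos1]
  by_cases hmem : p1[i] ∈ p2
  · obtain ⟨j0, hidx⟩ := Option.isSome_iff_exists.mp ((PySem.List.index?_isSome_iff _ _).mpr hmem)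
    have hidx' : PySem.List.index? ((fragsB s2 p2).map Prod.fst) p1[i] = some j0 := by
      rw [fragsB_map_fst]; exact hidx
    obtain ⟨hjf, hfind⟩ := find?_of_index? (fragsB s2 p2) p1[i] j0 hidx'
    have hj2 : j0 < p2.length := by
      have := hjf; rw [fragsB_length] at this; exact this
    have hpos2 : (0:Int) ≤ p2[j0] := h2n _ (List.getElem_mem hj2)
    have hpg : PySem.List.pyGetD p2 ((j0:Nat) : Int) 0 = p2[j0] := by
      rw [PySem.List.pyGetD_natCast, List.getD_eq_getElem _ _ hj2]
    have hfrag2 : (if ((j0:Nat) : Int) + 1 < (p2.length : Int) then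
          PySem.Str.strip (PySem.Str.slice s2 (some (PySem.List.pyGetD p2 ((j0:Nat) : Int) 0))
            (some (PySem.List.pyGetD p2 (((j0:Nat) : Int) + 1) 0)))
        else PySem.Str.strip (PySem.Str.slice s2 (some (PySem.List.pyGetD p2 ((j0:Nat) : Int) 0)) none))
        = PySem.Str.strip (PySem.Str.slice s2 (some p2[j0])
            (some (if h : j0 + 1 < p2.length then p2[j0 + 1] else PySem.Str.len s2))) := by
      by_cases h : j0 + 1 < p2.length
      · rw [if_pos (by push_cast; omega), dif_pos h, hpg]
        have : ((j0:Nat) : Int) + 1 = ((j0 + 1 : Nat) : Int) := by push_cast; ring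
        rw [this, PySem.List.pyGetD_natCast, List.getD_eq_getElem _ _ h]
      · rw [if_neg (by push_cast; omega), dif_neg h, hpg, slice_none_eq_len s2 _ hpos2]
    show gA s1 s2 p1 p2 ((0:Int) + (i:Int), p1[i]) = _
    unfold gA
    simp only [hfind, hf1]
    rw [if_pos hmem, hidx]
    simp only [Option.getD_some]
    rw [hfrag2, fragsB_getElem s2 p2 j0 hj2]
  · have hfind : (fragsB s2 p2).find? (fun qg => qg.1 == p1[i]) = none := by
      apply find?_none_of_not_mem
      rw [fragsB_map_fst]
      exact hmem
    unfold gA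
    simp only [hfind, hf1]
    rw [if_neg hmem]

-- ===== VERDICT =====
theorem combinar_strings_spec : Claim_equal_combinar_strings := by
  intro s1 s2 _
  unfold Spec_combinar_strings
  rw [A_map s1 s2, B_map s1 s2]
  apply List.ext_getElem
  · rw [List.length_map, List.length_map, PySem.List.length_enumerate, fragsB_length]
  · intro i h1 h2
    rw [List.getElem_map, List.getElem_map, PySem.List.getElem_enumerate]
    have hi : i < (startsB s1).length := by
      rw [List.length_map, fragsB_length] at h2; exact h2
    rw [fragsB_getElem s1 (startsB s1) i hi]
    exact elem_eq s1 s2 (startsB s1) (startsB s2) (startsB_nonneg s1) (startsB_nonneg s2) i hi
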